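-- pv_equiv track=rewrite | github.com/MrBrantCode/unitest_baseline | mut_generate/mist_train_taco/taco_12227/solution.py | is_palindrome_possible
-- ===== SOURCE A (Python) =====
-- def is_palindrome_possible(st: str) -> bool:
--     def is_palindrome(s: str) -> bool:
--         return s == s[::-1]
--
--     def generate_transformations(s: str) -> list:
--         transformations = []
--         for i in range(len(s)):
--             char = s[i]
--             if char == 'a':
--                 transformations.append('b')
--             elif char == 'z':
--                 transformations.append('y')
--             else:
--                 transformations.append(chr(ord(char) - 1))
--                 transformations.append(chr(ord(char) + 1))
--         return transformations
--
--     def backtrack(s: str, index: int, current: str) -> bool: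
--         if index == len(s):
--             return is_palindrome(current)
--
--         original_char = s[index]
--         transformations = generate_transformations(original_char)
--
--         for trans in transformations:
--             if backtrack(s, index + 1, current + trans):
--                 return True
--
--         return False
--
--     return backtrack(st, 0, "")
-- ===== SOURCE B (Python) =====
-- def is_palindrome_possible(st: str) -> bool:
--     def targets(c: str) -> tuple:
--         if c == 'a':
--             return ('b',)
--         if c == 'z':
--             return ('y',)
--         return (chr(ord(c) - 1), chr(ord(c) + 1))
--
--     n = len(st)
--     return all(
--         any(x in targets(st[n - 1 - i]) for x in targets(st[i]))
--         for i in range(n // 2)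
--     )
-- ===== Notes on version B (the rewrite author's own statement) =====
-- stated objective: faster
-- what changed: Replaced the exponential backtracking over all transformed strings with an O(n) scan checking that the two transform sets of each mirror pair intersect (the middle character is always free).
import Mathlib
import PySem

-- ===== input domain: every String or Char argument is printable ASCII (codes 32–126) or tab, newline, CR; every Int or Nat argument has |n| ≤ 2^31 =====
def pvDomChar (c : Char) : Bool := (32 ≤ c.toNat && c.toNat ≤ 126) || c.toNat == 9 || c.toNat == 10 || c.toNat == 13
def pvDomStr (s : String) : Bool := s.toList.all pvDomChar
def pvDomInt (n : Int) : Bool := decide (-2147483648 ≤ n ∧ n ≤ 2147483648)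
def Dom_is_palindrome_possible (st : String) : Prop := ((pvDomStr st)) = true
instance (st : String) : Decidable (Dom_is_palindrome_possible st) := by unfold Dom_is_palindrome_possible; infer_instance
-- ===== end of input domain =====

-- B replaces A's exponential backtracking with an O(n) check that each mirror
-- pair's transform sets intersect (the middle character is always free).

-- ===== PORT A =====
-- generate_transformations: loop over the characters of s, appending transforms.
def pvGenTransformations (s : List Char) : List Char :=
  s.foldl (fun acc char =>
    if char = 'a' then acc ++ ['b']
    else if char = 'z' then acc ++ ['y']
    else acc ++ [Char.ofNat (char.toNat - 1), Char.ofNat (char.toNat + 1)]) []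

-- backtrack(s, index, current): the pair (s, index) is carried as the remaining
-- suffix s[index:] (structural recursion on it); current is the accumulator string.
def pvBacktrack (rem : List Char) (current : List Char) : Bool :=
  match rem with
  | [] => current == current.reverse          -- is_palindrome(current)
  | c :: rest =>
      (pvGenTransformations [c]).any (fun trans => pvBacktrack rest (current ++ [trans]))

def is_palindrome_possible (st : String) : Bool :=
  pvBacktrack st.toList []

-- ===== PORT B =====
def pvTargets (c : Char) : List Char :=
  if c = 'a' then ['b']
  else if c = 'z' then ['y']
  else [Char.ofNat (c.toNat - 1), Char.ofNat (c.toNat + 1)]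

def is_palindrome_possible_alt (st : String) : Bool :=
  let s := st.toList
  let n := s.length
  (List.range (n / 2)).all (fun i =>
    (pvTargets (s.getD i ' ')).any (fun x => (pvTargets (s.getD (n - 1 - i) ' ')).contains x))

-- ===== PRECONDITION & SPEC =====
def Spec_is_palindrome_possible (st : String) (out : Bool) : Prop := out = is_palindrome_possible_alt st
instance (st : String) (out : Bool) : Decidable (Spec_is_palindrome_possible st out) := by unfold Spec_is_palindrome_possible; infer_instance

-- ===== CLAIM (what is proved, stated in full; the proofs are below) =====
def Claim_equal_is_palindrome_possible : Prop := ∀ (st : String), Dom_is_palindrome_possible st → Spec_is_palindrome_possible st (is_palindrome_possible st)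

-- ===== LEMMAS AND PROOFS =====

theorem pvGen_single (c : Char) : pvGenTransformations [c] = pvTargets c := by
  simp [pvGenTransformations, pvTargets]

theorem pvTargets_ne_nil (c : Char) : pvTargets c ≠ [] := by
  unfold pvTargets; split_ifs <;> simp

-- characterization of backtrack: some choice of per-character transforms makes
-- current ++ ts a palindrome.
theorem pvBacktrack_iff (rem : List Char) (cur : List Char) :
    pvBacktrack rem cur = true ↔
      ∃ ts, List.Forall₂ (fun c t => t ∈ pvTargets c) rem ts ∧
        (cur ++ ts) = (cur ++ ts).reverse := by
  induction rem generalizing cur with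
  | nil =>
      simp only [pvBacktrack, beq_iff_eq]
      constructor
      · intro h; exact ⟨[], List.Forall₂.nil, by simpa using h⟩
      · rintro ⟨ts, hf, hp⟩
        cases hf; simpa using hp
  | cons c rest ih =>
      simp only [pvBacktrack, List.any_eq_true, pvGen_single]
      constructor
      · rintro ⟨t, ht, hb⟩
        obtain ⟨ts, hf, hp⟩ := (ih (cur ++ [t])).mp hb
        exact ⟨t :: ts, List.Forall₂.cons ht hf, by simpa [List.append_assoc] using hp⟩
      · rintro ⟨ts, hf, hp⟩
        cases hf with
        | cons ht hf' =>
            rename_i t ts'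
            exact ⟨t, ht, (ih (cur ++ [t])).mpr ⟨ts', hf', by simpa [List.append_assoc] using hp⟩⟩

theorem pvForall2_get {s ts : List Char}
    (hf : List.Forall₂ (fun c t => t ∈ pvTargets c) s ts) :
    s.length = ts.length ∧ ∀ i (h₁ : i < s.length) (h₂ : i < ts.length),
      ts[i] ∈ pvTargets s[i] := by
  rw [List.forall₂_iff_get] at hf; exact hf

-- the existence of a palindromic choice is equivalent to B's pairwise condition
theorem pvExists_iff_pairs (s : List Char) :
    (∃ ts, List.Forall₂ (fun c t => t ∈ pvTargets c) s ts ∧ ts = ts.reverse) ↔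
      ∀ i, i < s.length / 2 →
        ∃ x, x ∈ pvTargets (s.getD i ' ') ∧ x ∈ pvTargets (s.getD (s.length - 1 - i) ' ') := by
  constructor
  · rintro ⟨ts, hf, hp⟩ i hi
    obtain ⟨hlen, hmem⟩ := pvForall2_get hf
    have hin : i < s.length := by omega
    have hjn : s.length - 1 - i < s.length := by omega
    have hilen : i < ts.length := by omega
    have e : ts.getD i ' ' = ts.getD (s.length - 1 - i) ' ' := by
      conv_lhs => rw [hp]
      rw [List.getD_eq_getElem _ _ (by simpa using hilen), List.getElem_reverse,
          List.getD_eq_getElem _ _ (by omega)]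
      congr 1
      omega
    refine ⟨ts.getD i ' ', ?_, ?_⟩
    · rw [List.getD_eq_getElem _ _ hilen, List.getD_eq_getElem _ _ hin]
      exact hmem i hin hilen
    · rw [e, List.getD_eq_getElem _ _ (show s.length - 1 - i < ts.length by omega),
          List.getD_eq_getElem _ _ hjn]
      exact hmem _ hjn (by omega)
  · intro h
    classical
    -- turn the pairwise hypothesis into a total choice function g
    obtain ⟨g, hg⟩ : ∃ g : Nat → Char, ∀ i (_ : i < s.length / 2),
        g i ∈ pvTargets (s.getD i ' ') ∧ g i ∈ pvTargets (s.getD (s.length - 1 - i) ' ') := by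
      refine ⟨fun i => if hi : i < s.length / 2 then Classical.choose (h i hi) else 'b', ?_⟩
      intro i hi
      simp only [dif_pos hi]
      exact Classical.choose_spec (h i hi)
    -- the candidate string: mirrored pick below the middle, any transform in the middle
    refine ⟨(List.range s.length).map (fun i =>
        if i < s.length / 2 then g i
        else if s.length - 1 - i < s.length / 2 then g (s.length - 1 - i)
        else (pvTargets (s.getD i ' ')).head (pvTargets_ne_nil _)), ?_, ?_⟩
    · rw [List.forall₂_iff_get]
      refine ⟨by simp, ?_⟩
      intro i h₁ h₂
      simp only [List.get_eq_getElem, List.getElem_map, List.getElem_range]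
      rw [← List.getD_eq_getElem s ' ' h₁]
      split_ifs with c1 c2
      · exact (hg i c1).1
      · have := (hg _ c2).2
        rwa [show s.length - 1 - (s.length - 1 - i) = i by omega] at this
      · exact List.head_mem _
    · apply List.ext_getElem
      · simp
      · intro i h₁ h₂
        simp only [List.length_map, List.length_range] at h₁
        rw [List.getElem_reverse]
        simp only [List.getElem_map, List.getElem_range, List.length_map, List.length_range]
        split_ifs with c1 c2 c3 <;> try omega
        · congr 1
          omega
        · rfl
        · have hmid : s.length - 1 - i = i := by omega
          simp only [hmid]
-- B's Bool computation decodes to the pairwise condition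
theorem pvAlt_iff (st : String) :
    is_palindrome_possible_alt st = true ↔
      ∀ i, i < st.toList.length / 2 →
        ∃ x, x ∈ pvTargets (st.toList.getD i ' ') ∧
             x ∈ pvTargets (st.toList.getD (st.toList.length - 1 - i) ' ') := by
  simp [is_palindrome_possible_alt, List.all_eq_true, List.any_eq_true, List.mem_range]

-- ===== VERDICT (by name: the statement is the Claim_ definition above) =====
theorem is_palindrome_possible_spec : Claim_equal_is_palindrome_possible := by
  intro st _
  unfold Spec_is_palindrome_possible
  rcases hb : is_palindrome_possible_alt st with _ | _
  · rcases ha : is_palindrome_possible st with _ | _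
    · rfl
    · exfalso
      have := (pvBacktrack_iff st.toList []).mp ha
      simp only [List.nil_append] at this
      have := (pvExists_iff_pairs st.toList).mp this
      have := (pvAlt_iff st).mpr this
      rw [hb] at this; exact Bool.false_ne_true this
  · have hp := (pvAlt_iff st).mp hb
    have := (pvExists_iff_pairs st.toList).mpr hp
    have := (pvBacktrack_iff st.toList []).mpr (by simpa using this)
    simpa [is_palindrome_possible] using this
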